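-- pv_equiv track=rewrite | github.com/LHANTAEK/Algorithm_Baekjoon | 프로그래머스/2/42586. 기능개발/기능개발.py | solution
-- ===== SOURCE A (Python) =====
-- import math
--
-- def solution(progresses, speeds):
--     answer = []
--     days = []
--
--     for i in range(len(progresses)):
--         days.append(math.ceil((100 - progresses[i]) / speeds[i]))
--
--     max_day = days[0]
--     count = 0
--
--     for day in days:
--         if day > max_day:
--             answer.append(count)
--             count = 1
--             max_day = day
--         else:
--             count += 1
--
--     answer.append(count)
--
--     return answer
-- ===== SOURCE B (Python) =====
-- def solution(progresses, speeds):
--     days = [-((p - 100) // s) for p, s in zip(progresses, speeds)]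
--     peaks = []
--     m = days[0]  # empty input is outside the stated precondition
--     for d in days:
--         if d > m:
--             m = d
--         peaks.append(m)
--     counts = {}
--     for v in peaks:
--         counts[v] = counts.get(v, 0) + 1
--     return list(counts.values())
-- ===== Notes on version B (the rewrite author's own statement) =====
-- stated objective: alternative
-- what changed: Replaces A's run-detection counting loop by a staged prefix-maximum pass followed by a dict counter: batch sizes are read off as the multiplicities of the (nondecreasing) prefix maxima, returned as the dict's values in insertion order.
import Mathlib
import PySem

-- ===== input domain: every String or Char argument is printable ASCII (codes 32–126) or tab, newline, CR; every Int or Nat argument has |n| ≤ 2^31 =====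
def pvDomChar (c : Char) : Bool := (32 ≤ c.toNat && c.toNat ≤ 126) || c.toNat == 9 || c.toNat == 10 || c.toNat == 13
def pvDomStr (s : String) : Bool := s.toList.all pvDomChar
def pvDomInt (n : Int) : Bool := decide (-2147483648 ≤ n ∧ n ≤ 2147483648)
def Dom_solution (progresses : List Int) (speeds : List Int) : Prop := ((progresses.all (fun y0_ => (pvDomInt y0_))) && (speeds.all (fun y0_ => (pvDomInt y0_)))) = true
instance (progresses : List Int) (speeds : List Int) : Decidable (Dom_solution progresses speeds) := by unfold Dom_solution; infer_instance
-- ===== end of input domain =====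

-- B replaces A's run-detection counting loop by a staged prefix-maximum pass plus a
-- dict counter (batch sizes = multiplicities of the prefix maxima, in insertion order);
-- same O(n) cost, different algorithm. A's math.ceil((100-p)/s) over floats is exact
-- integer ceiling division on Dom (|values| ≤ 2^31 ≪ 2^53), so both ports use -((p-100)//s).

-- ===== PORT A =====
def solution (progresses : List Int) (speeds : List Int) : List Int :=
  -- days.append(math.ceil((100 - progresses[i]) / speeds[i]))  — exact ceil division on Dom
  let days := (List.range progresses.length).foldl
    (fun ds (i : Nat) => ds ++ [-(PySem.Int.floordiv (PySem.List.pyGetD progresses (i : Int) 0 - 100)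
                          (PySem.List.pyGetD speeds (i : Int) 0))]) []
  -- max_day = days[0] (Pre_ guarantees nonempty); flat counting loop
  let st := days.foldl
    (fun (st : List Int × Int × Int) day =>
      if day > st.2.1 then (st.1 ++ [st.2.2], day, 1) else (st.1, st.2.1, st.2.2 + 1))
    ([], days.headD 0, 0)
  st.1 ++ [st.2.2]

-- ===== PORT B =====
def solution_alt (progresses : List Int) (speeds : List Int) : List Int :=
  let days := (progresses.zip speeds).map (fun ps => -(PySem.Int.floordiv (ps.1 - 100) ps.2))
  -- peaks: prefix maxima of days, m starting at days[0] (Pre_ guarantees nonempty)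
  let peaks := (days.foldl
    (fun (st : List Int × Int) d =>
      let m := if d > st.2 then d else st.2
      (st.1 ++ [m], m)) ([], days.headD 0)).1
  -- counts[v] = counts.get(v, 0) + 1
  let counts := peaks.foldl
    (fun (d : PySem.Dict Int Int) v => d.insert v (d.getD v 0 + 1)) PySem.Dict.empty
  counts.values

-- ===== PRECONDITION & SPEC =====
-- A raises IndexError on empty progresses (days[0]) and when speeds is shorter than
-- progresses (speeds[i]), and ZeroDivisionError when a used speed is 0; exactly those
-- inputs are excluded.
def Pre_solution (progresses : List Int) (speeds : List Int) : Prop :=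
  progresses ≠ [] ∧ progresses.length ≤ speeds.length ∧
    ∀ s ∈ speeds.take progresses.length, s ≠ 0
instance (progresses : List Int) (speeds : List Int) : Decidable (Pre_solution progresses speeds) := by
  unfold Pre_solution; infer_instance
def pvWitness_solution : List Int × List Int := ([93, 30, 55], [1, 30, 5])

def Spec_solution (progresses : List Int) (speeds : List Int) (out : List Int) : Prop := out = solution_alt progresses speeds
instance (progresses : List Int) (speeds : List Int) (out : List Int) : Decidable (Spec_solution progresses speeds out) := by unfold Spec_solution; infer_instance

-- ===== CLAIM (what is proved, stated in full; the proofs are below) =====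
def Claim_equal_solution : Prop := ∀ (progresses : List Int) (speeds : List Int), Dom_solution progresses speeds → Pre_solution progresses speeds → Spec_solution progresses speeds (solution progresses speeds)

-- ===== LEMMAS AND PROOFS =====

-- A's index-loop building days equals B's zip-map, given enough speeds
theorem days_eq (progresses speeds : List Int)
    (h : progresses.length ≤ speeds.length) :
    (List.range progresses.length).foldl
      (fun ds (i : Nat) => ds ++ [-(PySem.Int.floordiv (PySem.List.pyGetD progresses (i : Int) 0 - 100)
                            (PySem.List.pyGetD speeds (i : Int) 0))]) []
    = (progresses.zip speeds).map (fun ps => -(PySem.Int.floordiv (ps.1 - 100) ps.2)) := by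
  rw [PySem.List.foldl_append_singleton_eq_map]
  apply List.ext_getElem
  · simp; omega
  · intro i h1 h2
    simp only [List.nil_append, List.getElem_map, List.getElem_zip, List.getElem_range,
      PySem.List.pyGetD_natCast]
    have hip : i < progresses.length := by simp at h1; exact h1
    rw [List.getD_eq_getElem _ _ hip, List.getD_eq_getElem _ _ (by omega)]

-- B's combined loop: prefix-max and dict counting fused into one pass
def pvCFold (days : List Int) (d : PySem.Dict Int Int) (m : Int) : PySem.Dict Int Int × Int :=
  days.foldl
    (fun (st : PySem.Dict Int Int × Int) day =>
      let m' := if day > st.2 then day else st.2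
      (st.1.insert m' (st.1.getD m' 0 + 1), m')) (d, m)

-- fusing the staged peaks pass with the counting pass
theorem fuse (days : List Int) : ∀ (pk : List Int) (m : Int) (d : PySem.Dict Int Int),
    ((days.foldl (fun (st : List Int × Int) x =>
        let m' := if x > st.2 then x else st.2
        (st.1 ++ [m'], m')) (pk, m)).1).foldl
      (fun (d : PySem.Dict Int Int) v => d.insert v (d.getD v 0 + 1)) d
    = ((pvCFold days (pk.foldl (fun (d : PySem.Dict Int Int) v => d.insert v (d.getD v 0 + 1)) d) m).1) := by
  induction days with
  | nil => intro pk m d; simp [pvCFold]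
  | cons x rest ih =>
    intro pk m d
    simp only [List.foldl_cons, pvCFold] at *
    rw [ih (pk ++ [if x > m then x else m]) _ d, List.foldl_append]
    simp

-- appending a fresh element keeps a list Nodup
theorem nodup_append_singleton {xs : List Int} {a : Int} (h : xs.Nodup) (h2 : a ∉ xs) :
    (xs ++ [a]).Nodup := by
  simp only [List.nodup_append, List.nodup_cons, List.not_mem_nil, not_false_iff,
    List.nodup_nil, and_true, true_and]
  exact ⟨h, fun b hb => by simp; exact fun he => h2 (he ▸ hb)⟩

-- main invariant: A's flat loop vs B's fused dict loop
theorem main_inv (days : List Int) : ∀ (I0 : List (Int × Int)) (ans : List Int) (m c : Int)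
    (d : PySem.Dict Int Int),
    d.items = I0 ++ [(m, c)] → d.keys.Nodup → (∀ k ∈ d.keys, k ≤ m) →
    d.values = ans ++ [c] →
    ((pvCFold days d m).1).values
      = (days.foldl
          (fun (st : List Int × Int × Int) day =>
            if day > st.2.1 then (st.1 ++ [st.2.2], day, 1) else (st.1, st.2.1, st.2.2 + 1))
          (ans, m, c)).1
        ++ [(days.foldl
          (fun (st : List Int × Int × Int) day =>
            if day > st.2.1 then (st.1 ++ [st.2.2], day, 1) else (st.1, st.2.1, st.2.2 + 1))
          (ans, m, c)).2.2] := by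
  induction days with
  | nil => intro I0 ans m c d hitems _ _ hvals; simpa [pvCFold] using hvals
  | cons day rest ih =>
    intro I0 ans m c d hitems hnd hle hvals
    have hkeys : d.keys = I0.map Prod.fst ++ [m] := by
      simp [PySem.Dict.keys, hitems]
    have hmem : (m, c) ∈ d.items := by rw [hitems]; simp
    by_cases hgt : day > m
    · -- new batch: day ∉ keys, insert appends
      have hnotmem : day ∉ d.keys := fun h => absurd (hle day h) (by omega)
      have hnc : d.contains day = false := by
        rw [PySem.Dict.contains_eq_decide_mem_keys]; simpa using hnotmem
      simp only [pvCFold, List.foldl_cons, if_pos hgt]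
      rw [PySem.Dict.getD_of_not_contains d 0 hnc]
      simp only [zero_add]
      have h1 : (d.insert day 1).items = (I0 ++ [(m, c)]) ++ [(day, 1)] := by
        rw [PySem.Dict.items_insert_of_not_contains d 1 hnc, hitems]
      have hkeys1 : (d.insert day 1).keys = d.keys ++ [day] := by
        simp [PySem.Dict.keys, h1, hitems]
      have := ih (I0 ++ [(m, c)]) (ans ++ [c]) day 1 _ h1
        (by rw [hkeys1]; exact nodup_append_singleton hnd hnotmem)
        (by intro k hk
            rw [hkeys1] at hk
            rcases List.mem_append.1 hk with hk | hk
            · have := hle k hk; omega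
            · simp at hk; omega)
        (by simp only [PySem.Dict.values, h1, hitems, List.map_append] at *
            simp at hvals ⊢; rw [hvals])
      simpa using this
    · -- same batch: increment the last entry (key m)
      have hnotI0 : ∀ p ∈ I0, p.1 ≠ m := by
        rw [hkeys] at hnd
        intro p hp he
        have := (List.nodup_append.1 hnd).2.2
        exact absurd (by simp : m ∈ [m]) (by
          have := this (p.1) (List.mem_map_of_mem hp)
          simp [he] at this)
      have hcd : d.contains m = true := by
        rw [PySem.Dict.contains_eq_decide_mem_keys]; simp [hkeys]
      have hgetD : d.getD m 0 = c := PySem.Dict.getD_of_mem_items d hmem hnd 0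
      simp only [pvCFold, List.foldl_cons, if_neg hgt, hgetD]
      have h1 : (d.insert m (c + 1)).items = I0 ++ [(m, c + 1)] := by
        rw [PySem.Dict.items_insert_of_contains d (c + 1) hcd, hitems, List.map_append]
        congr 1
        · rw [show List.map (fun p => if (p.1 == m) = true then (m, c + 1) else p) I0
              = List.map id I0 from
            List.map_congr_left (fun p hp => by simp [hnotI0 p hp])]
          exact List.map_id I0
        · simp
      have hkeys1 : (d.insert m (c + 1)).keys = d.keys := by
        simp [PySem.Dict.keys, h1, hitems]
      have := ih I0 ans m (c + 1) _ h1
        (by rw [hkeys1]; exact hnd)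
        (by rw [hkeys1]; exact hle)
        (by simp only [PySem.Dict.values, h1, hitems, List.map_append] at *
            simp at hvals ⊢; rw [hvals])
      simpa using this

-- ===== VERDICT (by name: the statement is the Claim_ definition above) =====
theorem solution_spec : Claim_equal_solution := by
  intro progresses speeds _ hpre
  obtain ⟨hne, hlen, _⟩ := hpre
  unfold Spec_solution solution solution_alt
  rw [days_eq progresses speeds hlen]
  set days := (progresses.zip speeds).map (fun ps => -(PySem.Int.floordiv (ps.1 - 100) ps.2))
    with hdays
  have hdne : days ≠ [] := by
    have hl : days.length = min progresses.length speeds.length := by simp [hdays]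
    intro hnil
    rw [hnil] at hl
    have hp : 0 < progresses.length := List.length_pos_of_ne_nil hne
    simp at hl
    omega
  obtain ⟨d0, rest, hcons⟩ := List.exists_cons_of_ne_nil hdne
  rw [hcons]
  simp only [List.headD_cons]
  rw [fuse (d0 :: rest) [] d0 PySem.Dict.empty]
  simp only [List.foldl_nil]
  -- first iteration on both sides
  have hA : ((d0 :: rest).foldl
      (fun (st : List Int × Int × Int) day =>
        if day > st.2.1 then (st.1 ++ [st.2.2], day, 1) else (st.1, st.2.1, st.2.2 + 1))
      ([], d0, 0)) = (rest.foldl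
      (fun (st : List Int × Int × Int) day =>
        if day > st.2.1 then (st.1 ++ [st.2.2], day, 1) else (st.1, st.2.1, st.2.2 + 1))
      ([], d0, 1)) := by simp
  have hB : (pvCFold (d0 :: rest) PySem.Dict.empty d0)
      = pvCFold rest (PySem.Dict.empty.insert d0 1) d0 := by
    simp [pvCFold, PySem.Dict.getD_empty]
  rw [hA, hB]
  exact (main_inv rest [] [] d0 1 _ (by rfl)
    (by simp [PySem.Dict.keys, PySem.Dict.insert, PySem.Dict.empty])
    (by intro k hk
        simp [PySem.Dict.keys, PySem.Dict.insert, PySem.Dict.empty] at hk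
        omega)
    (by rfl)).symm
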